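-- pv_equiv track=rewrite | github.com/knewbeing/safescripts | .github/scripts/install_selected.py | _classify_tool_path
-- ===== SOURCE A (Python) =====
-- def _classify_tool_path(path: str) -> str | None:
--     lowered = path.lower().replace("\\", "/")
--     parts = [part for part in lowered.split("/") if part]
--     filename = parts[-1] if parts else ""
--
--     if filename == "copilot-instructions.md" or ".instructions." in filename:
--         return "instruction"
--     if ".prompt." in filename:
--         return "skill"
--     if any(part in {"instructions", "instruction"} for part in parts):
--         return "instruction"
--     if any(part in {"agents", "agent"} for part in parts):
--         return "agent"
--     if any(part in {"prompts", "prompt", "skills", "skill"} for part in parts):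
--         return "skill"
--     return None
-- ===== SOURCE B (Python) =====
-- _KEYWORDS = {
--     "instructions": (0, "instruction"),
--     "instruction": (0, "instruction"),
--     "agents": (1, "agent"),
--     "agent": (1, "agent"),
--     "prompts": (2, "skill"),
--     "prompt": (2, "skill"),
--     "skills": (2, "skill"),
--     "skill": (2, "skill"),
-- }
--
--
-- def _classify_tool_path(path: str) -> str | None:
--     parts = [p for p in path.lower().replace("\\", "/").split("/") if p]
--     filename = parts[-1] if parts else ""
--     if filename == "copilot-instructions.md" or ".instructions." in filename:
--         return "instruction"
--     if ".prompt." in filename: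
--         return "skill"
--     best = None
--     for part in parts:
--         hit = _KEYWORDS.get(part)
--         if hit is not None and (best is None or hit[0] < best[0]):
--             best = hit
--     return best[1] if best is not None else None
-- ===== Notes on version B (the rewrite author's own statement) =====
-- stated objective: alternative
-- what changed: The three separate any()-scans over parts (instruction, then agent, then skill) are replaced by a keyword->(priority, category) map and a single pass over parts that keeps the minimum-priority hit, resolving the precedence arithmetically instead of by scan order.
import Mathlib
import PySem

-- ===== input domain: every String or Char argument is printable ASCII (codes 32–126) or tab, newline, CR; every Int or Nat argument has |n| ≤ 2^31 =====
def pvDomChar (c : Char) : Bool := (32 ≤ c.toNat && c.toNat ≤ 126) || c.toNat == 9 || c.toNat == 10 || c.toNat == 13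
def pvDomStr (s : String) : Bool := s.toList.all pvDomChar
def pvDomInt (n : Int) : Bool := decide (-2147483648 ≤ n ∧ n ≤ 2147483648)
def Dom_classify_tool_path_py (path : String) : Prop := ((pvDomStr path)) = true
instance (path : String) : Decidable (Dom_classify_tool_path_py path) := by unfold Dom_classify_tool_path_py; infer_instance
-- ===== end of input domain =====

-- B replaces A's three sequential any()-scans over the path parts by one pass that keeps the
-- minimum-priority keyword hit from a keyword->(priority, category) table (alternative decomposition, same cost).

-- ===== PORT A =====
def classify_tool_path_py (path : String) : Option String :=
  let lowered := PySem.Str.replace (PySem.Str.lower path) "\\" "/"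
  let parts := ((PySem.Str.split? lowered "/").getD []).filter (fun part => !(part == ""))
  let filename := (parts.getLast?).getD ""
  if filename == "copilot-instructions.md" || PySem.Str.isIn ".instructions." filename then
    some "instruction"
  else if PySem.Str.isIn ".prompt." filename then
    some "skill"
  else if parts.any (fun part => part == "instructions" || part == "instruction") then
    some "instruction"
  else if parts.any (fun part => part == "agents" || part == "agent") then
    some "agent"
  else if parts.any (fun part => part == "prompts" || part == "prompt" || part == "skills" || part == "skill") then
    some "skill"
  else
    none

-- ===== PORT B =====
def pvKeywords : PySem.Dict String (Int × String) :=
  ⟨[("instructions", (0, "instruction")), ("instruction", (0, "instruction")),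
    ("agents", (1, "agent")), ("agent", (1, "agent")),
    ("prompts", (2, "skill")), ("prompt", (2, "skill")),
    ("skills", (2, "skill")), ("skill", (2, "skill"))]⟩

-- one loop iteration: best = hit if hit is a strictly smaller-priority keyword hit
def pvStep (best : Option (Int × String)) (part : String) : Option (Int × String) :=
  match PySem.Dict.get? pvKeywords part with
  | some hit =>
    match best with
    | none => some hit
    | some b => if hit.1 < b.1 then some hit else best
  | none => best

def classify_tool_path_py_alt (path : String) : Option String :=
  let parts := ((PySem.Str.split? (PySem.Str.replace (PySem.Str.lower path) "\\" "/") "/").getD []).filter (fun part => !(part == ""))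
  let filename := (parts.getLast?).getD ""
  if filename == "copilot-instructions.md" || PySem.Str.isIn ".instructions." filename then
    some "instruction"
  else if PySem.Str.isIn ".prompt." filename then
    some "skill"
  else
    match parts.foldl pvStep none with
    | some best => some best.2
    | none => none

-- ===== PRECONDITION & SPEC =====
def Spec_classify_tool_path_py (path : String) (out : Option String) : Prop := out = classify_tool_path_py_alt path
instance (path : String) (out : Option String) : Decidable (Spec_classify_tool_path_py path out) := by unfold Spec_classify_tool_path_py; infer_instance

-- ===== CLAIM (what is proved, stated in full; the proofs are below) =====
def Claim_equal_classify_tool_path_py : Prop := ∀ (path : String), Dom_classify_tool_path_py path → Spec_classify_tool_path_py path (classify_tool_path_py path)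

-- ===== LEMMAS AND PROOFS =====

-- combine: keep the smaller-priority hit (left wins ties)
def pvMo (a c : Option (Int × String)) : Option (Int × String) :=
  match c with
  | none => a
  | some h =>
    match a with
    | none => some h
    | some b => if h.1 < b.1 then some h else a

-- the four values the accumulator / a lookup can take
def pvS (a : Option (Int × String)) : Prop :=
  a = none ∨ a = some (0, "instruction") ∨ a = some (1, "agent") ∨ a = some (2, "skill")

-- what A's three scans compute, as a (priority, category) value
def pvMScan (parts : List String) : Option (Int × String) :=
  if parts.any (fun part => part == "instructions" || part == "instruction") then some (0, "instruction")
  else if parts.any (fun part => part == "agents" || part == "agent") then some (1, "agent")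
  else if parts.any (fun part => part == "prompts" || part == "prompt" || part == "skills" || part == "skill") then some (2, "skill")
  else none

theorem pvStep_eq (a : Option (Int × String)) (p : String) :
    pvStep a p = pvMo a (PySem.Dict.get? pvKeywords p) := by
  cases h : PySem.Dict.get? pvKeywords p <;> simp [pvStep, pvMo, h]

theorem pvKw_eq (p : String) :
    PySem.Dict.get? pvKeywords p =
      (if p == "instructions" || p == "instruction" then some ((0 : Int), "instruction")
       else if p == "agents" || p == "agent" then some (1, "agent")
       else if p == "prompts" || p == "prompt" || p == "skills" || p == "skill" then some (2, "skill")
       else none) := by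
  simp only [pvKeywords, PySem.Dict.get?, List.find?]
  simp only [Bool.beq_comm]
  cases hb1 : p == "instructions" <;> cases hb2 : p == "instruction" <;>
  cases hb3 : p == "agents" <;> cases hb4 : p == "agent" <;>
  cases hb5 : p == "prompts" <;> cases hb6 : p == "prompt" <;>
  cases hb7 : p == "skills" <;> cases hb8 : p == "skill" <;>
  simp only [hb1, hb2, hb3, hb4, hb5, hb6, hb7, hb8, Bool.false_or, Bool.true_or, if_true, if_false, Bool.or_false] <;> rfl

theorem pvKw_S (p : String) : pvS (PySem.Dict.get? pvKeywords p) := by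
  rw [pvKw_eq]; unfold pvS; split_ifs <;> simp

theorem pvMScan_S (parts : List String) : pvS (pvMScan parts) := by
  unfold pvMScan pvS; split_ifs <;> simp

theorem pvMo_none (c : Option (Int × String)) : pvMo none c = c := by
  cases c <;> rfl

theorem pvMo_S {a c : Option (Int × String)} (ha : pvS a) (hc : pvS c) : pvS (pvMo a c) := by
  rcases ha with h | h | h | h <;> rcases hc with h' | h' | h' | h' <;> subst h <;> subst h' <;> simp [pvS, pvMo]

theorem pvMo_assoc {a x y : Option (Int × String)} (ha : pvS a) (hx : pvS x) (hy : pvS y) :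
    pvMo (pvMo a x) y = pvMo a (pvMo x y) := by
  rcases ha with h | h | h | h <;> rcases hx with h' | h' | h' | h' <;>
    rcases hy with h'' | h'' | h'' | h'' <;> subst h <;> subst h' <;> subst h'' <;> decide

theorem pvMScan_cons (p : String) (rest : List String) :
    pvMScan (p :: rest) = pvMo (PySem.Dict.get? pvKeywords p) (pvMScan rest) := by
  rw [pvKw_eq]
  unfold pvMScan
  simp only [List.any_cons]
  by_cases h1 : (p == "instructions" || p == "instruction") = true
  · simp only [h1, Bool.true_or, if_true]
    split_ifs <;> simp_all [pvMo]
  · rw [Bool.not_eq_true] at h1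
    simp only [h1, Bool.false_or]
    by_cases h2 : (p == "agents" || p == "agent") = true
    · simp only [h2, Bool.true_or, if_true]
      split_ifs <;> simp_all [pvMo]
    · rw [Bool.not_eq_true] at h2
      simp only [h2, Bool.false_or]
      by_cases h3 : (p == "prompts" || p == "prompt" || p == "skills" || p == "skill") = true
      · simp only [h3, Bool.true_or, if_true]
        split_ifs <;> simp_all [pvMo]
      · rw [Bool.not_eq_true] at h3
        simp only [h3, Bool.false_or]
        split_ifs <;> simp_all [pvMo]

theorem pvFoldl_mo (parts : List String) :
    ∀ (a : Option (Int × String)), pvS a → parts.foldl pvStep a = pvMo a (pvMScan parts) := by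
  induction parts with
  | nil => intro a _; simp [pvMScan, pvMo]
  | cons p rest ih =>
    intro a ha
    rw [List.foldl_cons, pvStep_eq, ih _ (pvMo_S ha (pvKw_S p)), pvMScan_cons,
      pvMo_assoc ha (pvKw_S p) (pvMScan_S rest)]

theorem pvTail_eq (parts : List String) :
    (if parts.any (fun part => part == "instructions" || part == "instruction") then
       some "instruction"
     else if parts.any (fun part => part == "agents" || part == "agent") then
       some "agent"
     else if parts.any (fun part => part == "prompts" || part == "prompt" || part == "skills" || part == "skill") then
       some "skill"
     else none) =
    (match parts.foldl pvStep none with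
     | some best => some best.2
     | none => (none : Option String)) := by
  rw [pvFoldl_mo parts none (Or.inl rfl), pvMo_none]
  unfold pvMScan
  split_ifs <;> rfl

theorem pvBody_eq (parts : List String) (filename : String) :
    (if filename == "copilot-instructions.md" || PySem.Str.isIn ".instructions." filename then
       some "instruction"
     else if PySem.Str.isIn ".prompt." filename then
       some "skill"
     else if parts.any (fun part => part == "instructions" || part == "instruction") then
       some "instruction"
     else if parts.any (fun part => part == "agents" || part == "agent") then
       some "agent"
     else if parts.any (fun part => part == "prompts" || part == "prompt" || part == "skills" || part == "skill") then
       some "skill"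
     else none) =
    (if filename == "copilot-instructions.md" || PySem.Str.isIn ".instructions." filename then
       some "instruction"
     else if PySem.Str.isIn ".prompt." filename then
       some "skill"
     else
       match parts.foldl pvStep none with
       | some best => some best.2
       | none => (none : Option String)) := by
  by_cases h1 : (filename == "copilot-instructions.md" || PySem.Str.isIn ".instructions." filename) = true
  · rw [if_pos h1, if_pos h1]
  · rw [if_neg h1, if_neg h1]
    by_cases h2 : PySem.Str.isIn ".prompt." filename = true
    · rw [if_pos h2, if_pos h2]
    · rw [if_neg h2, if_neg h2]
      exact pvTail_eq parts

-- ===== VERDICT (by name: the statement is the Claim_ definition above) =====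
theorem classify_tool_path_py_spec : Claim_equal_classify_tool_path_py := by
  intro path _
  unfold Spec_classify_tool_path_py classify_tool_path_py classify_tool_path_py_alt
  exact pvBody_eq _ _
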